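-- pv_equiv track=rewrite | github.com/mkadlof/plepiseq-wgs-pipeline | bin/infl/analyze_infl_mutations.py | get_sample_status
-- ===== SOURCE A (Python) =====
-- def get_sample_status(lista_mutacji, slownik_opornosci):
--     mutacje_opornosciowe = {}
--     for klucz in slownik_opornosci:
--         status = slownik_opornosci[klucz]
--         if status in ['RI', 'HRI']:
--             if set(klucz.split('+')).issubset(set(lista_mutacji)):
--                 # W przypadku mutacji "skomplikowanych" jak E99G+H255Y patrzymy czy obie skladowe mutacje
--                 # wystepuja wsrod mutacji waznych
--                 mutacje_opornosciowe[klucz] = status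
--         else:
--             # mutacje nieistotne dla danego leku, nie raportuje raczej bo po co
--             continue
--
--     status = 'S'
--     # teraz okreslamy jaka jest najmocniejsza mutacja i zwracamy stringa "S" dla NI, I dla RI i R dla HRI i 'U' jesli nie ma opornosci
--     for klucz in mutacje_opornosciowe:
--         if mutacje_opornosciowe[klucz] == 'RI' and status in ['S']:
--             status = 'I'
--         elif mutacje_opornosciowe[klucz] == 'HRI' and status in ['S', 'I']:
--             status = 'R'
--
--     return mutacje_opornosciowe, status
-- ===== SOURCE B (Python) =====
-- def get_sample_status(lista_mutacji, slownik_opornosci):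
--     RANK = {'RI': 1, 'HRI': 2}
--     muts = set(lista_mutacji)
--     pairs = []
--     best = 0
--     for klucz, status in slownik_opornosci.items():
--         r = RANK.get(status, 0)
--         if r and muts.issuperset(klucz.split('+')):
--             pairs.append((klucz, status))
--             best = max(r, best)
--     return dict(pairs), 'SIR'[best]
-- ===== Notes on version B (the rewrite author's own statement) =====
-- stated objective: alternative
-- what changed: A's two staged loops (build the dict, then scan it with a string state machine S->I->R) are fused into one pass that keeps a numeric severity maximum via a RANK table and indexes 'SIR' by it, and set(lista_mutacji) is built once before the loop instead of once per key.
import Mathlib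
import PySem

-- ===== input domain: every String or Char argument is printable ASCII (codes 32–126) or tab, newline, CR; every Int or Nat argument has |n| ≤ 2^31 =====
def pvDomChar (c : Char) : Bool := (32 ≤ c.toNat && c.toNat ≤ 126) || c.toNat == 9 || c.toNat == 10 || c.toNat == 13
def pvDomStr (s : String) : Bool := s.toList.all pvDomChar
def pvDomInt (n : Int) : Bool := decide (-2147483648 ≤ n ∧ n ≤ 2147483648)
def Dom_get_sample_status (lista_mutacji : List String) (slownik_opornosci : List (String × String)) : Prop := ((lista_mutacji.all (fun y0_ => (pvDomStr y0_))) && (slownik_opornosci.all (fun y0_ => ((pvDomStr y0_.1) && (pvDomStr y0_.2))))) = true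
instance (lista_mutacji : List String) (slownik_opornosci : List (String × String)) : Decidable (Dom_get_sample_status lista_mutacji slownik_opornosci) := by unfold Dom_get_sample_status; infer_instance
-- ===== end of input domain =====

-- B fuses A's two loops into ONE pass with a numeric severity maximum (RANK table + 'SIR'[best])
-- and hoists set(lista_mutacji) out of the loop, which A rebuilds for every key (objective: alternative).

-- shared helper: klucz.split('+'), exact via PySem.Chars.splitOn (the sep ≠ "" form of str.split)
def pvSplitPlus (s : String) : List String :=
  (PySem.Chars.splitOn s.toList "+".toList).map String.ofList

-- ===== PORT A =====
-- body of A's first loop: status = slownik[klucz]; if status in ['RI','HRI'] and the split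
-- components form a subset, mutacje_opornosciowe[klucz] = status
def pvAStep (d : PySem.Dict String String) (lista_mutacji : List String)
    (m : PySem.Dict String String) (klucz : String) : PySem.Dict String String :=
  let status := (d.get? klucz).getD ""
  if status = "RI" ∨ status = "HRI" then
    if PySem.Set.issubset (PySem.Set.ofList (pvSplitPlus klucz)) (PySem.Set.ofList lista_mutacji) then
      m.insert klucz status
    else m
  else m

-- body of A's second loop: the accumulator update of the overall status
def pvAStatusStep (mo : PySem.Dict String String) (st : String) (klucz : String) : String :=
  if (mo.get? klucz).getD "" = "RI" ∧ st = "S" then "I"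
  else if (mo.get? klucz).getD "" = "HRI" ∧ (st = "S" ∨ st = "I") then "R"
  else st

def get_sample_status (lista_mutacji : List String) (slownik_opornosci : List (String × String)) : (List (String × String)) × String :=
  let d := PySem.Dict.ofList slownik_opornosci
  let mo := d.keys.foldl (pvAStep d lista_mutacji) PySem.Dict.empty
  let st := mo.keys.foldl (pvAStatusStep mo) "S"
  (mo.items, st)

-- ===== PORT B =====
-- RANK = {'RI': 1, 'HRI': 2}
def pvRankDict : PySem.Dict String Int := PySem.Dict.ofList [("RI", 1), ("HRI", 2)]

-- body of B's single fused loop over slownik.items(): r = RANK.get(status, 0);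
-- if r and muts.issuperset(klucz.split('+')): pairs.append(...); best = max(r, best)
def pvBStep (muts : PySem.Set String) (acc : (List (String × String)) × Int)
    (p : String × String) : (List (String × String)) × Int :=
  let r := pvRankDict.getD p.2 0
  if r ≠ 0 ∧ PySem.Set.issuperset muts (pvSplitPlus p.1) then
    (acc.1 ++ [p], max r acc.2)
  else acc

def get_sample_status_alt (lista_mutacji : List String) (slownik_opornosci : List (String × String)) : (List (String × String)) × String :=
  let muts := PySem.Set.ofList lista_mutacji
  let res := (PySem.Dict.ofList slownik_opornosci).items.foldl (pvBStep muts) ([], 0)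
  ((PySem.Dict.ofList res.1).items,
   match PySem.Str.pyGet? "SIR" res.2 with  -- 'SIR'[best]; best ∈ {0,1,2} so always in range
   | some c => String.ofList [c]
   | none => "")

-- ===== PRECONDITION & SPEC =====
def Spec_get_sample_status (lista_mutacji : List String) (slownik_opornosci : List (String × String)) (out : (List (String × String)) × String) : Prop := out = get_sample_status_alt lista_mutacji slownik_opornosci
instance (lista_mutacji : List String) (slownik_opornosci : List (String × String)) (out : (List (String × String)) × String) : Decidable (Spec_get_sample_status lista_mutacji slownik_opornosci out) := by unfold Spec_get_sample_status; infer_instance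

-- ===== CLAIM (what is proved, stated in full; the proofs are below) =====
def Claim_equal_get_sample_status : Prop := ∀ (lista_mutacji : List String) (slownik_opornosci : List (String × String)), Dom_get_sample_status lista_mutacji slownik_opornosci → Spec_get_sample_status lista_mutacji slownik_opornosci (get_sample_status lista_mutacji slownik_opornosci)

-- ===== LEMMAS AND PROOFS =====

-- the filter predicate both programs effectively apply to a (key, status) pair
def pvPred (l : List String) (p : String × String) : Bool :=
  (p.2 == "RI" || p.2 == "HRI") && (pvSplitPlus p.1).all (fun c => l.contains c)

-- proof-only name for the body of A's second loop once the lookup is resolved to the pair's value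
def pvStep (st : String) (p : String × String) : String :=
  if p.2 = "RI" ∧ st = "S" then "I"
  else if p.2 = "HRI" ∧ (st = "S" ∨ st = "I") then "R" else st

def pvRank (s : String) : Int := pvRankDict.getD s 0

-- A's subset test and the membership form agree
lemma pvSubset_eq_all (l : List String) (k : String) :
    PySem.Set.issubset (PySem.Set.ofList (pvSplitPlus k)) (PySem.Set.ofList l)
      = (pvSplitPlus k).all (fun c => l.contains c) := by
  rw [Bool.eq_iff_iff, PySem.Set.issubset_iff, List.all_eq_true]
  constructor
  · intro hc c hm
    have := hc c (by rw [PySem.Set.mem_ofList]; exact hm)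
    rw [PySem.Set.mem_ofList] at this
    simpa using this
  · intro h x hx
    rw [PySem.Set.mem_ofList] at hx
    have := h x hx
    simp only [PySem.Set.mem_ofList]
    simpa using this

-- A's loop body, once the looked-up value is known, is the filter test
lemma pvAStep_eq (d : PySem.Dict String String) (l : List String)
    (m : PySem.Dict String String) (p : String × String) (h : d.get? p.1 = some p.2) :
    pvAStep d l m p.1 = if pvPred l p then m.insert p.1 p.2 else m := by
  simp only [pvAStep, pvPred, h, Option.getD_some, ← pvSubset_eq_all]
  by_cases h1 : p.2 = "RI" ∨ p.2 = "HRI" <;>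
    rcases h2 : PySem.Set.issubset (PySem.Set.ofList (pvSplitPlus p.1)) (PySem.Set.ofList l) with _ | _ <;>
    simp_all [Bool.or_eq_true, beq_iff_eq]

-- A's first loop builds exactly the filtered item list
lemma pvBuild (d : PySem.Dict String String) (l : List String)
    (ps : List (String × String)) (m : PySem.Dict String String)
    (hget : ∀ p ∈ ps, d.get? p.1 = some p.2)
    (hnd : (ps.map Prod.fst).Nodup)
    (hfresh : ∀ p ∈ ps, m.contains p.1 = false) :
    ((ps.map Prod.fst).foldl (pvAStep d l) m).items = m.items ++ ps.filter (pvPred l) := by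
  induction ps generalizing m with
  | nil => simp
  | cons p rest ih =>
    have hget' : ∀ q ∈ rest, d.get? q.1 = some q.2 :=
      fun q hq => hget q (List.mem_cons_of_mem _ hq)
    rw [List.map_cons, List.nodup_cons] at hnd
    simp only [List.map_cons, List.foldl_cons, List.filter_cons]
    rw [pvAStep_eq d l m p (hget p List.mem_cons_self)]
    rcases hp : pvPred l p with _ | _
    · rw [if_neg (by simp)]
      rw [ih m hget' hnd.2 (fun q hq => hfresh q (List.mem_cons_of_mem _ hq))]
      simp
    · rw [if_pos rfl]
      have hfresh' : ∀ q ∈ rest, (m.insert p.1 p.2).contains q.1 = false := by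
        intro q hq
        rw [PySem.Dict.contains_insert]
        have hne : q.1 ≠ p.1 := fun he => hnd.1 (he ▸ List.mem_map_of_mem hq)
        simp [hne, hfresh q (List.mem_cons_of_mem _ hq)]
      rw [ih (m.insert p.1 p.2) hget' hnd.2 hfresh']
      rw [PySem.Dict.items_insert_of_not_contains _ _ (hfresh p List.mem_cons_self)]
      simp

-- the accumulator scan, started at 'R', stays 'R'
lemma pvStatusR (ps : List (String × String)) : ps.foldl pvStep "R" = "R" := by
  induction ps with
  | nil => rfl
  | cons p rest ih => simpa [pvStep] using ih

-- started at 'I', it ends 'R' iff some remaining value is 'HRI'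
lemma pvStatusI (ps : List (String × String)) :
    ps.foldl pvStep "I" = if ps.any (fun p => p.2 == "HRI") then "R" else "I" := by
  induction ps with
  | nil => rfl
  | cons p rest ih =>
    simp only [List.foldl_cons, List.any_cons]
    by_cases h : p.2 = "HRI"
    · have h1 : pvStep "I" p = "R" := by simp [pvStep, h]
      simp [h1, h, pvStatusR]
    · have h1 : pvStep "I" p = "I" := by simp [pvStep, h]
      have hb : (p.2 == "HRI") = false := by simpa using h
      simp only [h1, ih, hb, Bool.false_or]

-- started at 'S' (as in A): the membership characterisation
lemma pvStatusS (ps : List (String × String)) :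
    ps.foldl pvStep "S"
      = if ps.any (fun p => p.2 == "HRI") then "R"
        else if ps.any (fun p => p.2 == "RI") then "I" else "S" := by
  induction ps with
  | nil => rfl
  | cons p rest ih =>
    simp only [List.foldl_cons, List.any_cons]
    by_cases hH : p.2 = "HRI"
    · have h1 : pvStep "S" p = "R" := by simp [pvStep, hH]
      simp [h1, hH, pvStatusR]
    · have hb : (p.2 == "HRI") = false := by simpa using hH
      by_cases hR : p.2 = "RI"
      · have h1 : pvStep "S" p = "I" := by simp [pvStep, hR]
        have hb2 : (p.2 == "RI") = true := by simpa using hR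
        simp only [h1, pvStatusI, hb, hb2, Bool.false_or, Bool.true_or]
        simp
      · have h1 : pvStep "S" p = "S" := by simp [pvStep, hH, hR]
        have hb2 : (p.2 == "RI") = false := by simpa using hR
        simp only [h1, ih, hb, hb2, Bool.false_or]

-- RANK.get(status, 0) in closed form
lemma pvRank_eq (s : String) :
    pvRank s = if s = "HRI" then 2 else if s = "RI" then 1 else 0 := by
  have h : pvRank s
      = ((List.find? (fun p => p.1 == s) [("RI", (1 : Int)), ("HRI", 2)]).map (fun x => x.2)).getD 0 := rfl
  rw [h]
  by_cases h1 : s = "RI"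
  · subst h1; simp
  · by_cases h2 : s = "HRI"
    · subst h2; simp
    · simp [h1, h2, Ne.symm h1, Ne.symm h2]

-- B's loop condition is the same filter predicate
lemma pvBCond_iff (l : List String) (p : String × String) :
    (pvRank p.2 ≠ 0 ∧ PySem.Set.issuperset (PySem.Set.ofList l) (pvSplitPlus p.1) = true)
      ↔ pvPred l p = true := by
  have hs : PySem.Set.issuperset (PySem.Set.ofList l) (pvSplitPlus p.1)
      = (pvSplitPlus p.1).all (fun c => l.contains c) := by
    rw [Bool.eq_iff_iff, PySem.Set.issuperset_iff, List.all_eq_true]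
    constructor
    · intro hc c hm
      have := hc c hm
      rw [PySem.Set.mem_ofList] at this
      simpa using this
    · intro h x hx
      have := h x hx
      rw [PySem.Set.mem_ofList]
      simpa using this
  rw [hs, pvPred, Bool.and_eq_true, Bool.or_eq_true, pvRank_eq]
  by_cases h1 : p.2 = "RI" <;> by_cases h2 : p.2 = "HRI" <;> simp [h1, h2]

-- B's fused fold splits into the filtered list and a running maximum over it
lemma pvBFold (l : List String) (ps : List (String × String))
    (acc : (List (String × String)) × Int) :
    ps.foldl (pvBStep (PySem.Set.ofList l)) acc
      = (acc.1 ++ ps.filter (pvPred l),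
         (ps.filter (pvPred l)).foldl (fun b p => max (pvRank p.2) b) acc.2) := by
  induction ps generalizing acc with
  | nil => simp
  | cons p rest ih =>
    simp only [List.foldl_cons, List.filter_cons]
    by_cases hp : pvPred l p = true
    · have hstep : pvBStep (PySem.Set.ofList l) acc p = (acc.1 ++ [p], max (pvRank p.2) acc.2) := by
        simp only [pvBStep]
        rw [show (pvRankDict.getD p.2 0) = pvRank p.2 from rfl]
        rw [if_pos ((pvBCond_iff l p).mpr hp)]
      rw [hstep, ih, hp]
      simp [pvRank]
    · have hstep : pvBStep (PySem.Set.ofList l) acc p = acc := by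
        simp only [pvBStep]
        rw [show (pvRankDict.getD p.2 0) = pvRank p.2 from rfl]
        rw [if_neg (fun hc => hp ((pvBCond_iff l p).mp hc))]
      rw [hstep, ih]
      simp [hp]

-- the running maximum over the filtered list is 2 / 1 / 0 by the same membership tests
lemma pvBest (fs : List (String × String)) (b0 : Int) (hb0 : 0 ≤ b0)
    (h : ∀ p ∈ fs, p.2 = "RI" ∨ p.2 = "HRI") :
    fs.foldl (fun b p => max (pvRank p.2) b) b0
      = max b0 (if fs.any (fun p => p.2 == "HRI") then 2
                else if fs.any (fun p => p.2 == "RI") then 1 else 0) := by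
  induction fs generalizing b0 with
  | nil => simp; omega
  | cons p rest ih =>
    have hrest : ∀ q ∈ rest, q.2 = "RI" ∨ q.2 = "HRI" :=
      fun q hq => h q (List.mem_cons_of_mem _ hq)
    have h0 : (0 : Int) ≤ max (pvRank p.2) b0 := le_max_of_le_right hb0
    simp only [List.foldl_cons, List.any_cons, ih (max (pvRank p.2) b0) h0 hrest]
    rcases h p List.mem_cons_self with hR | hH
    · have hr : pvRank p.2 = 1 := by rw [pvRank_eq, hR]; simp
      have hb : (p.2 == "HRI") = false := by simp [hR]
      have hb2 : (p.2 == "RI") = true := by simp [hR]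
      simp only [hr, hb, hb2, Bool.false_or, Bool.true_or]
      by_cases hA : rest.any (fun p => p.2 == "HRI") = true <;> simp [hA] <;> try omega
    · have hr : pvRank p.2 = 2 := by rw [pvRank_eq, hH]; simp
      have hb : (p.2 == "HRI") = true := by simp [hH]
      simp only [hr, hb, Bool.true_or]
      by_cases hA : rest.any (fun p => p.2 == "HRI") = true
      · simp [hA]; omega
      · by_cases hB : rest.any (fun p => p.2 == "RI") = true <;> simp [hA, hB] <;> omega

-- dict(pairs) over nodup keys is the identity on the item list
lemma pvOfList_items (ps : List (String × String)) (hnd : (ps.map Prod.fst).Nodup) :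
    (PySem.Dict.ofList ps).items = ps := by
  have : PySem.Dict.ofList ps = ps.foldl (fun d p => d.insert p.1 p.2) PySem.Dict.empty := rfl
  rw [this]
  have := PySem.Dict.items_foldl_insert_fresh (l := ps) (d := PySem.Dict.empty)
    (k := Prod.fst) (v := Prod.snd) (by intro a _; simp) hnd
  simpa using this

-- ===== VERDICT (by name: the statement is the Claim_ definition above) =====
theorem get_sample_status_spec : Claim_equal_get_sample_status := by
  intro l sl _
  unfold Spec_get_sample_status get_sample_status get_sample_status_alt
  show (let d := PySem.Dict.ofList sl;
        let mo := d.keys.foldl (pvAStep d l) PySem.Dict.empty;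
        let st := mo.keys.foldl (pvAStatusStep mo) "S";
        (mo.items, st))
      = (let muts := PySem.Set.ofList l;
         let res := (PySem.Dict.ofList sl).items.foldl (pvBStep muts) ([], 0);
         ((PySem.Dict.ofList res.1).items,
          match PySem.Str.pyGet? "SIR" res.2 with
          | some c => String.ofList [c]
          | none => ""))
  simp only []
  have hnd : (PySem.Dict.ofList sl).keys.Nodup := PySem.Dict.nodup_keys_ofList sl
  have hkeys : (PySem.Dict.ofList sl).keys = (PySem.Dict.ofList sl).items.map Prod.fst := rfl
  have hget : ∀ p ∈ (PySem.Dict.ofList sl).items, (PySem.Dict.ofList sl).get? p.1 = some p.2 := by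
    intro p hp
    exact PySem.Dict.get?_of_mem_items _ hp hnd
  set items := (PySem.Dict.ofList sl).items with hi
  set fs := items.filter (pvPred l) with hfs
  have hndi : (items.map Prod.fst).Nodup := by rw [← hkeys]; exact hnd
  have hndf : (fs.map Prod.fst).Nodup :=
    ((List.filter_sublist).map Prod.fst).nodup hndi
  -- A side
  set mo := (PySem.Dict.ofList sl).keys.foldl (pvAStep (PySem.Dict.ofList sl) l) PySem.Dict.empty with hmo
  have hitems : mo.items = fs := by
    rw [hmo, hkeys, pvBuild _ l _ PySem.Dict.empty hget hndi (by intro q _; simp)]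
    rfl
  have hmkeys : mo.keys = mo.items.map Prod.fst := rfl
  have hmnd : mo.keys.Nodup := by rw [hmkeys, hitems]; exact hndf
  have hmget : ∀ p ∈ mo.items, mo.get? p.1 = some p.2 := by
    intro p hp
    exact PySem.Dict.get?_of_mem_items _ hp hmnd
  have hfold : mo.keys.foldl (pvAStatusStep mo) "S" = mo.items.foldl pvStep "S" := by
    rw [hmkeys, List.foldl_map]
    refine PySem.List.foldl_congr_mem _ _ _ _ ?_
    intro st p hp
    simp [pvAStatusStep, pvStep, hmget p hp]
  -- B side
  have hB := pvBFold l items ([], 0)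
  have hfsv : ∀ p ∈ fs, p.2 = "RI" ∨ p.2 = "HRI" := by
    intro p hp
    have := List.of_mem_filter hp
    simp only [pvPred, Bool.and_eq_true, Bool.or_eq_true, beq_iff_eq] at this
    exact this.1
  have hbest := pvBest fs 0 le_rfl hfsv
  rw [hfold, pvStatusS, hitems]
  rw [hB]
  simp only [List.nil_append, ← hfs]
  rw [pvOfList_items fs hndf, hbest]
  by_cases hH : fs.any (fun p => p.2 == "HRI") = true
  · simp [hH, PySem.Str.pyGet?]
  · by_cases hR : fs.any (fun p => p.2 == "RI") = true <;>
      simp [hH, hR, PySem.Str.pyGet?]
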